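-- pv_equiv track=rewrite | github.com/matthematics/schubmult | src/schubmult/schub_lib/tests/legacy_perm_lib.py | elem_sym_perms
-- ===== SOURCE A (Python) =====
-- def has_bruhat_ascent(perm, i, j):
--     if perm[i] > perm[j]:
--         return False
--     for p in range(i + 1, j):
--         if perm[i] < perm[p] and perm[p] < perm[j]:
--             return False
--     return True
--
-- def elem_sym_perms(orig_perm, p, k):
--     total_list = [(orig_perm, 0)]
--     up_perm_list = [(orig_perm, 1000000000)]
--     for pp in range(p):
--         perm_list = []
--         for up_perm, last in up_perm_list:
--             up_perm2 = [*up_perm, len(up_perm) + 1]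
--             if len(up_perm2) < k + 1:
--                 up_perm2 += [i + 1 for i in range(len(up_perm2), k + 2)]
--             pos_list = [i for i in range(k) if up_perm2[i] < last]
--             for j in range(k, len(up_perm2)):
--                 if up_perm2[j] >= last:
--                     continue
--                 for i in pos_list:
--                     if has_bruhat_ascent(up_perm2, i, j):
--                         new_perm = [*up_perm2]
--                         new_perm[i], new_perm[j] = new_perm[j], new_perm[i]
--                         if new_perm[-1] == len(new_perm):
--                             new_perm_add = tuple(new_perm[:-1])
--                         else:
--                             new_perm_add = tuple(new_perm)
--                         perm_list += [(new_perm_add, up_perm2[j])]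
--                         total_list += [(new_perm_add, pp + 1)]
--         up_perm_list = perm_list
--     return total_list
-- ===== SOURCE B (Python) =====
-- def elem_sym_perms(orig_perm, p, k):
--     # Same enumeration, but covering ascents (i, j) are found by one leftward
--     # scan per j that tracks the running max of in-between values below u[j],
--     # instead of re-scanning the gap for every candidate i.
--     total = [(orig_perm, 0)]
--     frontier = [(orig_perm, 1000000000)]
--     for level in range(1, p + 1):
--         nxt = []
--         for up, last in frontier:
--             u = list(up) + [len(up) + 1]
--             if len(u) <= k:
--                 u += list(range(len(u) + 1, k + 3))
--             n = len(u)
--             for j in range(max(k, 0), n):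
--                 vj = u[j]
--                 if vj >= last:
--                     continue
--                 picks = []
--                 m = None
--                 for i in range(j - 1, -1, -1):
--                     vi = u[i]
--                     if i < k and vi < last and vi <= vj and (m is None or m <= vi):
--                         picks.append(i)
--                     if vi < vj and (m is None or vi > m):
--                         m = vi
--                 for i in reversed(picks):
--                     w = list(u)
--                     w[i], w[j] = vj, w[i]
--                     if w[-1] == len(w):
--                         w = w[:-1]
--                     res = tuple(w)
--                     nxt.append((res, vj))
--                     total.append((res, level))
--         frontier = nxt
--     return total
-- ===== Notes on version B (the rewrite author's own statement) =====
-- stated objective: alternative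
-- what changed: Per swap target j, a single leftward scan tracking the running max of in-between values below u[j] decides all covering Bruhat ascents at once, replacing A's per-candidate has_bruhat_ascent re-scan of the whole gap.
import Mathlib
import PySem

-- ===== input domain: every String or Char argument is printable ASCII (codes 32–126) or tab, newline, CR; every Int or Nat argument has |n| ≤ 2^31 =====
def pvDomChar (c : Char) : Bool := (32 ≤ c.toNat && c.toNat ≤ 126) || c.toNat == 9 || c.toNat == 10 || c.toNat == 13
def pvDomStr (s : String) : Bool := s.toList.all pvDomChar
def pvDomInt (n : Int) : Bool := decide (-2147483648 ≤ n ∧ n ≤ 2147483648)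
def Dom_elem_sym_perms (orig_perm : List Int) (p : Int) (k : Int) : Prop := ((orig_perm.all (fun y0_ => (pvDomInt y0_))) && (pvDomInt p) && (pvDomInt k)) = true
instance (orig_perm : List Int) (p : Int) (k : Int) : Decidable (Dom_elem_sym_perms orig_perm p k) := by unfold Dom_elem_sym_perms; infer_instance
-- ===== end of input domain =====

-- B replaces A's per-candidate Bruhat-ascent re-scan by one leftward scan per position j
-- that tracks the running max of in-between values below u[j] (objective: alternative).

-- ===== PORT A =====
-- literal port of has_bruhat_ascent (indices reachable from elem_sym_perms are in range;
-- the `none` fallbacks are unreachable inside Pre_)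
def has_bruhat_ascent (perm : List Int) (i : Int) (j : Int) : Bool :=
  match PySem.List.pyGet? perm i, PySem.List.pyGet? perm j with
  | some vi, some vj =>
    if vi > vj then false
    else
      (PySem.List.pyRange (i + 1) j 1).all (fun q =>
        match PySem.List.pyGet? perm q with
        | some vq => !(decide (vi < vq) && decide (vq < vj))
        | none => true)
  | _, _ => false

def elem_sym_perms (orig_perm : List Int) (p : Int) (k : Int) : List (List Int × Int) :=
  -- state: (total_list, up_perm_list)
  (((PySem.List.pyRange 0 p 1).foldl (fun (st : List (List Int × Int) × List (List Int × Int)) pp =>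
    st.2.foldl (fun (st2 : List (List Int × Int) × List (List Int × Int)) upl =>
      let up_perm := upl.1
      let last := upl.2
      let up_perm2 := up_perm ++ [((up_perm.length : Int) + 1)]
      let up_perm2 :=
        if (up_perm2.length : Int) < k + 1 then
          up_perm2 ++ (PySem.List.pyRange (up_perm2.length : Int) (k + 2) 1).map (fun i => i + 1)
        else up_perm2
      let pos_list := (PySem.List.pyRange 0 k 1).filter (fun i =>
        match PySem.List.pyGet? up_perm2 i with
        | some v => decide (v < last)
        | none => false)
      (PySem.List.pyRange k (up_perm2.length : Int) 1).foldl (fun st3 j =>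
        match PySem.List.pyGet? up_perm2 j with
        | none => st3
        | some vj =>
          if vj ≥ last then st3
          else
            pos_list.foldl (fun st4 i =>
              if has_bruhat_ascent up_perm2 i j then
                -- swap: new_perm[i], new_perm[j] = new_perm[j], new_perm[i]  (i, j ≥ 0 reachable)
                let new_perm := PySem.List.pySetD (PySem.List.pySetD up_perm2 i vj) j
                  (PySem.List.pyGetD up_perm2 i 0)
                let new_perm_add :=
                  if PySem.List.pyGet? new_perm (-1) = some ((new_perm.length : Int)) then
                    PySem.List.slice new_perm none (some (-1))
                  else new_perm
                (st4.1 ++ [(new_perm_add, pp + 1)], st4.2 ++ [(new_perm_add, vj)])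
              else st4) st3) (st2.1, st2.2)) (st.1, ([] : List (List Int × Int))))
    ([(orig_perm, (0 : Int))], [(orig_perm, (1000000000 : Int))]))).1

-- ===== PORT B =====
-- port of Source B's leftward scan (while-style loop from j-1 down to 0): the Nat argument is
-- the number of remaining indices (current index = n); returns picked i's in descending order
def pvScanB (u : List Int) (vj : Int) (last : Int) (k : Int) : Nat → Option Int → List Int
  | 0, _ => []
  | n + 1, m =>
    let vi := u.getD n 0
    let emit := decide ((n : Int) < k) && decide (vi < last) && decide (vi ≤ vj) &&
      (match m with | none => true | some mv => decide (mv ≤ vi))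
    let m' := if decide (vi < vj) && (match m with | none => true | some mv => decide (mv < vi)) then some vi else m
    (if emit then [((n : Int))] else []) ++ pvScanB u vj last k n m'

def elem_sym_perms_alt (orig_perm : List Int) (p : Int) (k : Int) : List (List Int × Int) :=
  -- state: (total, frontier)
  (((PySem.List.pyRange 1 (p + 1) 1).foldl (fun (st : List (List Int × Int) × List (List Int × Int)) level =>
    st.2.foldl (fun (st2 : List (List Int × Int) × List (List Int × Int)) upl =>
      let up := upl.1
      let last := upl.2
      let u := up ++ [((up.length : Int) + 1)]
      let u :=
        if (u.length : Int) ≤ k then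
          u ++ PySem.List.pyRange ((u.length : Int) + 1) (k + 3) 1
        else u
      (PySem.List.pyRange (max k 0) (u.length : Int) 1).foldl (fun st3 j =>
        let vj := u.getD j.toNat 0   -- j ≥ 0 and j < len(u): in range
        if vj ≥ last then st3
        else
          let picks := (pvScanB u vj last k j.toNat none).reverse
          let pairs := picks.map (fun i =>
            -- w = list(u); w[i], w[j] = vj, w[i]; trim trailing fixed point
            let w := PySem.List.pySetD (PySem.List.pySetD u i vj) j (u.getD i.toNat 0)
            let w :=
              if PySem.List.pyGet? w (-1) = some ((w.length : Int)) then
                PySem.List.slice w none (some (-1))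
              else w
            (w, vj))
          (st3.1 ++ pairs.map (fun q => (q.1, level)), st3.2 ++ pairs)) st2) (st.1, ([] : List (List Int × Int))))
    ([(orig_perm, (0 : Int))], [(orig_perm, (1000000000 : Int))]))).1

-- ===== PRECONDITION & SPEC =====
-- Pre_ excludes exactly the inputs where the Python A raises IndexError (p ≥ 1 with
-- k < -(len(orig_perm)+1): the very first loop index j = k is out of range).
def Pre_elem_sym_perms (orig_perm : List Int) (p : Int) (k : Int) : Prop :=
  p ≤ 0 ∨ -((orig_perm.length : Int) + 1) ≤ k
instance (orig_perm : List Int) (p : Int) (k : Int) : Decidable (Pre_elem_sym_perms orig_perm p k) := by unfold Pre_elem_sym_perms; infer_instance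

def pvWitness_elem_sym_perms : List Int × Int × Int := ([2, 1, 3], 2, 2)

def Spec_elem_sym_perms (orig_perm : List Int) (p : Int) (k : Int) (out : List (List Int × Int)) : Prop := out = elem_sym_perms_alt orig_perm p k
instance (orig_perm : List Int) (p : Int) (k : Int) (out : List (List Int × Int)) : Decidable (Spec_elem_sym_perms orig_perm p k out) := by unfold Spec_elem_sym_perms; infer_instance

-- ===== CLAIM (what is proved, stated in full; the proofs are below) =====
def Claim_equal_elem_sym_perms : Prop := ∀ (orig_perm : List Int) (p : Int) (k : Int), Dom_elem_sym_perms orig_perm p k → Pre_elem_sym_perms orig_perm p k → Spec_elem_sym_perms orig_perm p k (elem_sym_perms orig_perm p k)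



-- ===== LEMMAS AND PROOFS =====

-- proof-side abbreviations for the two ports' loop bodies (definitionally equal copies)
def pvSt : Type := List (List Int × Int) × List (List Int × Int)

def pvGd (u : List Int) (t : Nat) : Int := u.getD t 0

def pvABody (k : Int) (pp : Int) (st2 : pvSt) (upl : List Int × Int) : pvSt :=
  let up_perm := upl.1
  let last := upl.2
  let up_perm2 := up_perm ++ [((up_perm.length : Int) + 1)]
  let up_perm2 :=
    if (up_perm2.length : Int) < k + 1 then
      up_perm2 ++ (PySem.List.pyRange (up_perm2.length : Int) (k + 2) 1).map (fun i => i + 1)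
    else up_perm2
  let pos_list := (PySem.List.pyRange 0 k 1).filter (fun i =>
    match PySem.List.pyGet? up_perm2 i with
    | some v => decide (v < last)
    | none => false)
  (PySem.List.pyRange k (up_perm2.length : Int) 1).foldl (fun st3 j =>
    match PySem.List.pyGet? up_perm2 j with
    | none => st3
    | some vj =>
      if vj ≥ last then st3
      else
        pos_list.foldl (fun st4 i =>
          if has_bruhat_ascent up_perm2 i j then
            let new_perm := PySem.List.pySetD (PySem.List.pySetD up_perm2 i vj) j
              (PySem.List.pyGetD up_perm2 i 0)
            let new_perm_add :=
              if PySem.List.pyGet? new_perm (-1) = some ((new_perm.length : Int)) then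
                PySem.List.slice new_perm none (some (-1))
              else new_perm
            (st4.1 ++ [(new_perm_add, pp + 1)], st4.2 ++ [(new_perm_add, vj)])
          else st4) st3) (st2.1, st2.2)

def pvBBody (k : Int) (level : Int) (st2 : pvSt) (upl : List Int × Int) : pvSt :=
  let up := upl.1
  let last := upl.2
  let u := up ++ [((up.length : Int) + 1)]
  let u :=
    if (u.length : Int) ≤ k then
      u ++ PySem.List.pyRange ((u.length : Int) + 1) (k + 3) 1
    else u
  (PySem.List.pyRange (max k 0) (u.length : Int) 1).foldl (fun st3 j =>
    let vj := u.getD j.toNat 0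
    if vj ≥ last then st3
    else
      let picks := (pvScanB u vj last k j.toNat none).reverse
      let pairs := picks.map (fun i =>
        let w := PySem.List.pySetD (PySem.List.pySetD u i vj) j (u.getD i.toNat 0)
        let w :=
          if PySem.List.pyGet? w (-1) = some ((w.length : Int)) then
            PySem.List.slice w none (some (-1))
          else w
        (w, vj))
      (st3.1 ++ pairs.map (fun q => (q.1, level)), st3.2 ++ pairs)) st2

lemma pvA_eq (orig_perm : List Int) (p k : Int) :
    elem_sym_perms orig_perm p k =
      ((PySem.List.pyRange 0 p 1).foldl
        (fun (st : pvSt) pp => st.2.foldl (pvABody k pp) (st.1, ([] : List (List Int × Int))))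
        ([(orig_perm, (0 : Int))], [(orig_perm, (1000000000 : Int))])).1 := rfl

lemma pvB_eq (orig_perm : List Int) (p k : Int) :
    elem_sym_perms_alt orig_perm p k =
      ((PySem.List.pyRange 1 (p + 1) 1).foldl
        (fun (st : pvSt) level => st.2.foldl (pvBBody k level) (st.1, ([] : List (List Int × Int))))
        ([(orig_perm, (0 : Int))], [(orig_perm, (1000000000 : Int))])).1 := rfl

-- running-max machinery
def pvOmax : Option Int → Int → Option Int
  | none, v => some v
  | some x, v => some (max x v)

def pvOmLE : Option Int → Int → Bool
  | none, _ => true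
  | some v, x => decide (v ≤ x)

def pvMerge : Option Int → Option Int → Option Int
  | m, none => m
  | m, some x => pvOmax m x

def pvStep (u : List Int) (vj : Int) (m : Option Int) (q : Nat) : Option Int :=
  if pvGd u q < vj then pvOmax m (pvGd u q) else m

def pvMseg (u : List Int) (vj : Int) (a n : Nat) : Option Int :=
  (List.range' a (n - a)).foldl (pvStep u vj) none

def pvQm (u : List Int) (vj last : Int) (k : Int) (m : Option Int) (n t : Nat) : Bool :=
  decide ((t : Int) < k) && decide (pvGd u t < last) && decide (pvGd u t ≤ vj) &&
    pvOmLE (pvMerge m (pvMseg u vj (t + 1) n)) (pvGd u t)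

def pvQ (u : List Int) (vj last : Int) (k : Int) (j t : Nat) : Bool :=
  decide ((t : Int) < k) && decide (pvGd u t < last) && decide (pvGd u t ≤ vj) &&
    decide (∀ s : Nat, s < j → t < s → pvGd u s < vj → pvGd u s ≤ pvGd u t)

lemma pvMseg_none (u : List Int) (vj : Int) (a n : Nat) (h : n ≤ a) : pvMseg u vj a n = none := by
  unfold pvMseg
  rw [Nat.sub_eq_zero_of_le h]
  rfl

lemma pvMseg_concat (u : List Int) (vj : Int) (a n : Nat) (h : a ≤ n) :
    pvMseg u vj a (n + 1) = pvStep u vj (pvMseg u vj a n) n := by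
  unfold pvMseg
  have h1 : n + 1 - a = (n - a) + 1 := by omega
  rw [h1, List.range'_concat, List.foldl_append]
  have h2 : a + 1 * (n - a) = n := by omega
  rw [h2]
  rfl

lemma pvMerge_omax (m s : Option Int) (v : Int) :
    pvMerge (pvOmax m v) s = pvMerge m (pvOmax s v) := by
  cases m <;> cases s <;> simp [pvMerge, pvOmax] <;> omega

lemma pvOmLE_omax (m : Option Int) (v x : Int) :
    pvOmLE (pvOmax m v) x = (pvOmLE m x && decide (v ≤ x)) := by
  cases m <;> simp [pvOmLE, pvOmax]

lemma pvMerge_none (s : Option Int) : pvMerge none s = s := by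
  cases s <;> rfl

lemma pvMprime_eq (u : List Int) (vj : Int) (n : Nat) (m : Option Int) :
    (if decide (u.getD n 0 < vj) && (match m with | none => true | some mv => decide (mv < u.getD n 0))
      then some (u.getD n 0) else m)
      = (if pvGd u n < vj then pvOmax m (pvGd u n) else m) := by
  cases m with
  | none => by_cases h : u.getD n 0 < vj <;> simp [pvGd, pvOmax]
  | some x =>
    simp only [pvGd, pvOmax]
    split_ifs with h1 h2 <;> (simp_all; all_goals omega)

lemma pvScanB_singleton (u : List Int) (vj last k : Int) (n : Nat) (m : Option Int) :
    (if (decide ((n : Int) < k) && decide (u.getD n 0 < last) && decide (u.getD n 0 ≤ vj) &&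
        (match m with | none => true | some mv => decide (mv ≤ u.getD n 0))) then
      [((n : Nat) : Int)] else [])
      = (List.map (fun t : Nat => (t : Int)) (List.filter (pvQm u vj last k m (n + 1)) [n])).reverse := by
  have h1 := pvMseg_none u vj (n + 1) (n + 1) le_rfl
  rw [List.filter_singleton]
  cases m with
  | none =>
    by_cases a : (n : Int) < k <;> by_cases b : u.getD n 0 < last <;> by_cases c : u.getD n 0 ≤ vj <;>
      (simp_all [pvQm, pvMerge, pvOmLE, pvGd, Bool.cond_eq_ite] <;> split_ifs <;> simp_all)
  | some mv =>
    by_cases a : (n : Int) < k <;> by_cases b : u.getD n 0 < last <;> by_cases c : u.getD n 0 ≤ vj <;>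
        by_cases d : mv ≤ u.getD n 0 <;>
      (simp_all [pvQm, pvMerge, pvOmLE, pvGd, Bool.cond_eq_ite] <;> split_ifs <;> simp_all)

lemma pvScanB_spec (u : List Int) (vj last : Int) (k : Int) :
    ∀ (n : Nat) (m : Option Int),
      pvScanB u vj last k n m =
        (((List.range n).filter (pvQm u vj last k m n)).map (fun t : Nat => (t : Int))).reverse := by
  intro n
  induction n with
  | zero => intro m; simp [pvScanB]
  | succ n ih =>
    intro m
    rw [List.range_succ, List.filter_append, List.map_append, List.reverse_append]
    simp only [pvScanB]
    rw [pvMprime_eq u vj n m, ih]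
    congr 1
    · exact pvScanB_singleton u vj last k n m
    · -- recursive piece
      congr 1
      congr 1
      apply List.filter_congr
      intro t ht
      have htn : t < n := List.mem_range.mp ht
      unfold pvQm
      have h3 : pvMseg u vj (t + 1) (n + 1) = pvStep u vj (pvMseg u vj (t + 1) n) n :=
        pvMseg_concat u vj (t + 1) n (by omega)
      rw [h3]
      by_cases hv : pvGd u n < vj
      · rw [if_pos hv]
        unfold pvStep
        rw [if_pos hv, pvMerge_omax]
      · rw [if_neg hv]
        unfold pvStep
        rw [if_neg hv]

lemma pvMseg_le_iff (u : List Int) (vj x : Int) :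
    ∀ (n a : Nat), (pvOmLE (pvMseg u vj a n) x = true ↔
      ∀ s : Nat, a ≤ s → s < n → pvGd u s < vj → pvGd u s ≤ x) := by
  intro n
  induction n with
  | zero =>
    intro a
    rw [pvMseg_none u vj a 0 (Nat.zero_le a)]
    simp [pvOmLE]
  | succ n ih =>
    intro a
    by_cases h : a ≤ n
    · rw [pvMseg_concat u vj a n h]
      unfold pvStep
      by_cases hv : pvGd u n < vj
      · rw [if_pos hv, pvOmLE_omax, Bool.and_eq_true, ih a, decide_eq_true_eq]
        constructor
        · rintro ⟨hall, hx⟩ s hs1 hs2 hsv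
          rcases Nat.lt_succ_iff_lt_or_eq.mp hs2 with h' | h'
          · exact hall s hs1 h' hsv
          · subst h'; exact hx
        · intro hall
          exact ⟨fun s hs1 hs2 hsv => hall s hs1 (by omega) hsv, hall n h (by omega) hv⟩
      · rw [if_neg hv, ih a]
        constructor
        · intro hall s hs1 hs2 hsv
          rcases Nat.lt_succ_iff_lt_or_eq.mp hs2 with h' | h'
          · exact hall s hs1 h' hsv
          · subst h'; exact absurd hsv hv
        · intro hall s hs1 hs2 hsv
          exact hall s hs1 (by omega) hsv
    · have hna : n + 1 ≤ a := by omega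
      rw [pvMseg_none u vj a (n + 1) hna]
      simp only [pvOmLE, true_iff]
      intro s hs1 hs2 hs3
      omega

lemma pvPicks_eq (u : List Int) (vj last : Int) (k : Int) (j : Nat) :
    (pvScanB u vj last k j none).reverse =
      ((List.range j).filter (pvQ u vj last k j)).map (fun t : Nat => (t : Int)) := by
  rw [pvScanB_spec, List.reverse_reverse]
  congr 1
  apply List.filter_congr
  intro t ht
  have htj : t < j := List.mem_range.mp ht
  unfold pvQm pvQ
  rw [pvMerge_none]
  congr 1
  rw [Bool.eq_iff_iff, decide_eq_true_eq, pvMseg_le_iff u vj (pvGd u t) j (t + 1)]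
  constructor
  · intro hall s hs1 hs2 hs3
    exact hall s (by omega) hs1 hs3
  · intro hall s hs1 hs2 hs3
    exact hall s hs2 (by omega) hs3

lemma pvPosFilter_eq (u : List Int) (last k : Int) (j : Nat)
    (hk : 0 < k) (hkj : k.toNat ≤ j) (hj : j < u.length) :
    ((PySem.List.pyRange 0 k 1).filter (fun i =>
        match PySem.List.pyGet? u i with
        | some v => decide (v < last)
        | none => false)).filter (fun i => has_bruhat_ascent u i (j : Int))
      = ((List.range j).filter (pvQ u (pvGd u j) last k j)).map (fun t : Nat => (t : Int)) := by
  rw [PySem.List.pyRange_zero k, List.filter_map, List.filter_map, List.filter_filter]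
  have hsplit : List.range j = List.range k.toNat ++ (List.range (j - k.toNat)).map (fun x => k.toNat + x) := by
    rw [← List.range_add]
    congr 1
    omega
  rw [hsplit, List.filter_append]
  have h2 : ((List.range (j - k.toNat)).map (fun x => k.toNat + x)).filter (pvQ u (pvGd u j) last k j) = [] := by
    rw [List.filter_eq_nil_iff]
    intro a ha
    rcases List.mem_map.mp ha with ⟨x, _, rfl⟩
    unfold pvQ
    simp only [Bool.and_eq_true, decide_eq_true_eq, not_and]
    intro hlt
    exfalso
    omega
  rw [h2, List.append_nil]
  congr 1
  apply List.filter_congr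
  intro t ht
  have htk : t < k.toNat := List.mem_range.mp ht
  have htlen : t < u.length := by omega
  have hget_t : PySem.List.pyGet? u ((t : Nat) : Int) = some (pvGd u t) := by
    rw [PySem.List.pyGet?_natCast, List.getElem?_eq_getElem htlen]; unfold pvGd; rw [List.getD_eq_getElem u 0 htlen]
  have hget_j : PySem.List.pyGet? u ((j : Nat) : Int) = some (pvGd u j) := by
    rw [PySem.List.pyGet?_natCast, List.getElem?_eq_getElem hj]; unfold pvGd; rw [List.getD_eq_getElem u 0 hj]
  simp only [Function.comp_apply, has_bruhat_ascent, hget_t, hget_j]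
  by_cases hgt : pvGd u t > pvGd u j
  · rw [if_pos hgt]
    unfold pvQ
    rw [Bool.eq_iff_iff]
    simp only [Bool.false_and, Bool.and_eq_true, decide_eq_true_eq]
    constructor
    · intro hfalse; exact absurd hfalse (by simp)
    · rintro ⟨⟨⟨_, _⟩, hle⟩, _⟩; omega
  · rw [if_neg hgt]
    unfold pvQ
    rw [Bool.eq_iff_iff]
    simp only [Bool.and_eq_true, decide_eq_true_eq, List.all_eq_true]
    constructor
    · rintro ⟨hall, hlast⟩
      refine ⟨⟨⟨by omega, hlast⟩, by omega⟩, ?_⟩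
      intro s hsj hts hsv
      have hs := hall ((s : Nat) : Int) (PySem.List.mem_pyRange_one.mpr ⟨by omega, by omega⟩)
      have hslen : s < u.length := by omega
      have hget_s : PySem.List.pyGet? u ((s : Nat) : Int) = some (pvGd u s) := by
        rw [PySem.List.pyGet?_natCast, List.getElem?_eq_getElem hslen]; unfold pvGd; rw [List.getD_eq_getElem u 0 hslen]
      rw [hget_s] at hs
      simp only [Bool.not_eq_true', Bool.and_eq_false_iff, decide_eq_false_iff_not] at hs
      rcases hs with hs | hs <;> omega
    · rintro ⟨⟨⟨_, hlast⟩, _⟩, hall⟩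
      refine ⟨?_, hlast⟩
      intro q hq
      rcases PySem.List.mem_pyRange_one.mp hq with ⟨hq1, hq2⟩
      have hq0 : 0 ≤ q := by omega
      have hqs : q = ((q.toNat : Nat) : Int) := by omega
      have hqlen : q.toNat < u.length := by omega
      have hget_q : PySem.List.pyGet? u q = some (pvGd u q.toNat) := by
        conv_lhs => rw [hqs]
        rw [PySem.List.pyGet?_natCast, List.getElem?_eq_getElem hqlen]; unfold pvGd
        rw [List.getD_eq_getElem u 0 hqlen]
      rw [hget_q]
      have hinst := hall q.toNat (by omega) (by omega)
      simp only [Bool.not_eq_true', Bool.and_eq_false_iff, decide_eq_false_iff_not]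
      by_cases hv : pvGd u q.toNat < pvGd u j
      · left; have h5 := hinst hv; omega
      · right; omega

lemma pvFoldl_pair_append_if {α β γ : Type} (P : α → Bool) (f : α → β) (g : α → γ) :
    ∀ (l : List α) (t : List β) (u : List γ),
      l.foldl (fun s x => if P x then (s.1 ++ [f x], s.2 ++ [g x]) else s) (t, u)
        = (t ++ (l.filter P).map f, u ++ (l.filter P).map g) := by
  intro l
  induction l with
  | nil => intro t u; simp
  | cons x xs ih =>
    intro t u
    by_cases h : P x = true
    · simp [h, ih]
    · simp [h, ih]

lemma pvScanB_nil_of_nonpos (u : List Int) (vj last : Int) (k : Int) (hk : k ≤ 0) :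
    ∀ (n : Nat) (m : Option Int), pvScanB u vj last k n m = [] := by
  intro n
  induction n with
  | zero => intro m; rfl
  | succ n ih =>
    intro m
    have hd : ¬((n : Int) < k) := by omega
    simp only [pvScanB, decide_eq_false hd, Bool.false_and]
    simpa using ih _

lemma pvShift_eq (a b : Int) :
    (PySem.List.pyRange a b 1).map (fun i => i + 1) = PySem.List.pyRange (a + 1) (b + 1) 1 := by
  rw [PySem.List.pyRange_one, PySem.List.pyRange_one, List.map_map]
  have h : (b + 1 - (a + 1)) = (b - a) := by ring
  rw [h]
  apply List.map_congr_left
  intro t _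
  simp [Function.comp]
  ring

lemma pvPad_eq (l : List Int) (k : Int) :
    (if (l.length : Int) < k + 1 then
        l ++ (PySem.List.pyRange (l.length : Int) (k + 2) 1).map (fun i => i + 1)
      else l)
    = (if (l.length : Int) ≤ k then
        l ++ PySem.List.pyRange ((l.length : Int) + 1) (k + 3) 1
      else l) := by
  rw [pvShift_eq, show k + 2 + 1 = k + 3 from by ring]
  exact if_congr (by omega) rfl rfl

lemma pvPadLen_gt (l : List Int) (k : Int) (hk : 0 < k) (hl : l ≠ []) :
    k.toNat <
      (if (l.length : Int) ≤ k then
        l ++ PySem.List.pyRange ((l.length : Int) + 1) (k + 3) 1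
      else l).length := by
  have hl1 : 1 ≤ l.length := List.length_pos_of_ne_nil hl
  by_cases h : (l.length : Int) ≤ k
  · rw [if_pos h]
    rw [List.length_append, PySem.List.length_pyRange_one]
    omega
  · rw [if_neg h]
    omega

lemma pvInner_eq (k pp last : Int) (u : List Int) (hulen : 0 < k → k.toNat < u.length)
    (st2 : pvSt) :
    (PySem.List.pyRange k (u.length : Int) 1).foldl (fun st3 j =>
      match PySem.List.pyGet? u j with
      | none => st3
      | some vj =>
        if vj ≥ last then st3
        else
          ((PySem.List.pyRange 0 k 1).filter (fun i =>
            match PySem.List.pyGet? u i with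
            | some v => decide (v < last)
            | none => false)).foldl (fun st4 i =>
            if has_bruhat_ascent u i j then
              let new_perm := PySem.List.pySetD (PySem.List.pySetD u i vj) j
                (PySem.List.pyGetD u i 0)
              let new_perm_add :=
                if PySem.List.pyGet? new_perm (-1) = some ((new_perm.length : Int)) then
                  PySem.List.slice new_perm none (some (-1))
                else new_perm
              (st4.1 ++ [(new_perm_add, pp + 1)], st4.2 ++ [(new_perm_add, vj)])
            else st4) st3) (st2.1, st2.2)
    = (PySem.List.pyRange (max k 0) (u.length : Int) 1).foldl (fun st3 j =>
      let vj := u.getD j.toNat 0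
      if vj ≥ last then st3
      else
        let picks := (pvScanB u vj last k j.toNat none).reverse
        let pairs := picks.map (fun i =>
          let w := PySem.List.pySetD (PySem.List.pySetD u i vj) j (u.getD i.toNat 0)
          let w :=
            if PySem.List.pyGet? w (-1) = some ((w.length : Int)) then
              PySem.List.slice w none (some (-1))
            else w
          (w, vj))
        (st3.1 ++ pairs.map (fun q => (q.1, pp + 1)), st3.2 ++ pairs)) st2 := by
  by_cases hk : 0 < k
  · rw [max_eq_left hk.le, Prod.mk.eta]
    apply PySem.List.foldl_congr_mem
    intro acc j hj
    rcases PySem.List.mem_pyRange_one.mp hj with ⟨hj1, hj2⟩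
    have hulen' : k.toNat < u.length := hulen hk
    obtain ⟨jn, rfl⟩ : ∃ jn : Nat, j = (jn : Int) := ⟨j.toNat, by omega⟩
    have hjn : jn < u.length := by
      rw [← Nat.cast_lt (α := Int)]
      omega
    have hgetj : PySem.List.pyGet? u ((jn : Nat) : Int) = some (u.getD ((jn : Int)).toNat 0) := by
      rw [PySem.List.pyGet?_natCast, List.getElem?_eq_getElem hjn, Int.toNat_natCast,
        List.getD_eq_getElem u 0 hjn]
    rw [hgetj]
    simp only [Int.toNat_natCast]
    by_cases hlast : u.getD jn 0 ≥ last
    · rw [if_pos hlast, if_pos hlast]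
    · rw [if_neg hlast, if_neg hlast]
      obtain ⟨a1, a2⟩ := acc
      rw [pvFoldl_pair_append_if]
      rw [pvPosFilter_eq u last k jn hk (by omega) hjn]
      rw [pvPicks_eq]
      simp only [pvGd, List.map_map]
      congr 1
      · congr 1
        apply List.map_congr_left
        intro t _
        simp only [Function.comp_apply, PySem.List.pyGetD_natCast, Int.toNat_natCast]
      · congr 1
        apply List.map_congr_left
        intro t _
        simp only [Function.comp_apply, PySem.List.pyGetD_natCast, Int.toNat_natCast]
  · replace hk : k ≤ 0 := by omega
    rw [PySem.List.pyRange_one_eq_nil hk, List.filter_nil]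
    rw [max_eq_right hk]
    rw [PySem.List.foldl_congr_mem _ _ (fun s _ => s) _ (by
      intro acc j _
      cases hget : PySem.List.pyGet? u j with
      | none => rfl
      | some vj => by_cases hlast : vj ≥ last <;> simp [hlast]),
      PySem.List.foldl_ignore]
    rw [PySem.List.foldl_congr_mem _ _ (fun s _ => s) _ (by
      intro acc j _
      simp only [List.getD_eq_getElem?_getD]
      by_cases hlast : u[j.toNat]?.getD 0 ≥ last
      · simp [hlast]
      · simp [hlast, pvScanB_nil_of_nonpos u _ _ k hk]),
      PySem.List.foldl_ignore]
    exact Prod.mk.eta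

lemma pvBody_eq (k pp : Int) (st2 : pvSt) (upl : List Int × Int) :
    pvABody k pp st2 upl = pvBBody k (pp + 1) st2 upl := by
  simp only [pvABody, pvBBody]
  rw [pvPad_eq]
  exact pvInner_eq k pp upl.2 _ (fun hk => pvPadLen_gt _ k hk (by simp)) st2

theorem pvTop (orig_perm : List Int) (p k : Int) :
    elem_sym_perms orig_perm p k = elem_sym_perms_alt orig_perm p k := by
  rw [pvA_eq, pvB_eq]
  rw [PySem.List.pyRange_zero p, PySem.List.pyRange_one 1 (p + 1),
    show p + 1 - 1 = p from by ring, List.foldl_map, List.foldl_map]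
  have hfold :
      (List.range p.toNat).foldl
        (fun (st : pvSt) (t : Nat) => st.2.foldl (pvABody k ((t : Nat) : Int)) (st.1, ([] : List (List Int × Int))))
        ([(orig_perm, (0 : Int))], [(orig_perm, (1000000000 : Int))])
      = (List.range p.toNat).foldl
        (fun (st : pvSt) (t : Nat) => st.2.foldl (pvBBody k (1 + ((t : Nat) : Int))) (st.1, ([] : List (List Int × Int))))
        ([(orig_perm, (0 : Int))], [(orig_perm, (1000000000 : Int))]) := by
    apply PySem.List.foldl_congr_mem
    intro acc t _
    have h1 : acc.2.foldl (pvABody k ((t : Nat) : Int)) (acc.1, ([] : List (List Int × Int)))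
        = acc.2.foldl (pvBBody k (((t : Nat) : Int) + 1)) (acc.1, ([] : List (List Int × Int))) :=
      PySem.List.foldl_congr_mem _ _ _ _ (fun acc2 x _ => pvBody_eq k ((t : Nat) : Int) acc2 x)
    rw [h1, show ((t : Nat) : Int) + 1 = 1 + ((t : Nat) : Int) from by ring]
  rw [hfold]

-- ===== VERDICT (by name: the statement is the Claim_ definition above) =====
theorem elem_sym_perms_spec : Claim_equal_elem_sym_perms := by
  intro orig_perm p k _ _
  unfold Spec_elem_sym_perms
  exact pvTop orig_perm p k
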